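-- pv_equiv track=rewrite | github.com/TNI8181/data-discovery-homogenize-ai | streamlit_app.py | _pick_best_existing_variant
-- ===== SOURCE A (Python) =====
-- def _pick_best_existing_variant(variants):
--     """
--     Choose the most business-readable variant FROM the existing variants.
--     Heuristic (no synonym dictionaries).
--     """
--     def score(v: str) -> tuple:
--         s = str(v).strip()
--         has_space = " " in s
--         has_underscore = "_" in s
--         has_dash = "-" in s
--         is_all_lower = s.islower()
--         is_all_upper = s.isupper()
--
--         words = [w for w in s.replace("_", " ").replace("-", " ").split() if w]
--         titleish = sum(1 for w in words if w[:1].isupper()) >= max(1, int(0.7 * len(words)))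
--         short_token_penalty = sum(1 for w in words if len(w) <= 3)
--
--         return (
--             1 if has_space else 0,
--             1 if titleish else 0,
--             0 if not has_underscore else -1,
--             0 if not has_dash else -1,
--             1 if not is_all_lower else 0,
--             1 if not is_all_upper else 0,
--             -short_token_penalty,
--             len(s)
--         )
--
--     return sorted(list(variants), key=score, reverse=True)[0] if variants else ""
-- ===== SOURCE B (Python) =====
-- def _pick_best_existing_variant(variants):
--     """Successive elimination: filter candidates by each heuristic criterion in
--     priority order, keeping only the best at each pass; first survivor wins."""
--     cands = list(variants)
--     if not cands:
--         return ""
--     def prep(v):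
--         s = str(v).strip()
--         words = [w for w in s.replace("_", " ").replace("-", " ").split() if w]
--         return s, words
--     def criterion(i, v):
--         s, words = prep(v)
--         if i == 0:
--             return 1 if " " in s else 0
--         if i == 1:
--             caps = sum(1 for w in words if w[:1].isupper())
--             return 1 if caps >= max(1, int(0.7 * len(words))) else 0
--         if i == 2:
--             return -1 if "_" in s else 0
--         if i == 3:
--             return -1 if "-" in s else 0
--         if i == 4:
--             return 0 if s.islower() else 1
--         if i == 5:
--             return 0 if s.isupper() else 1
--         if i == 6:
--             return -sum(1 for w in words if len(w) <= 3)
--         return len(s)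
--     for i in range(8):
--         best = max(criterion(i, v) for v in cands)
--         cands = [v for v in cands if criterion(i, v) == best]
--     return cands[0]
-- ===== Notes on version B (the rewrite author's own statement) =====
-- stated objective: alternative
-- what changed: A builds one composite 8-component score tuple per variant and takes the head of a stable reverse sort; B never forms the tuple or sorts: it runs eight successive elimination passes, one per heuristic criterion in priority order, each keeping only the candidates achieving that criterion's maximum, and returns the first survivor.
import Mathlib
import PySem

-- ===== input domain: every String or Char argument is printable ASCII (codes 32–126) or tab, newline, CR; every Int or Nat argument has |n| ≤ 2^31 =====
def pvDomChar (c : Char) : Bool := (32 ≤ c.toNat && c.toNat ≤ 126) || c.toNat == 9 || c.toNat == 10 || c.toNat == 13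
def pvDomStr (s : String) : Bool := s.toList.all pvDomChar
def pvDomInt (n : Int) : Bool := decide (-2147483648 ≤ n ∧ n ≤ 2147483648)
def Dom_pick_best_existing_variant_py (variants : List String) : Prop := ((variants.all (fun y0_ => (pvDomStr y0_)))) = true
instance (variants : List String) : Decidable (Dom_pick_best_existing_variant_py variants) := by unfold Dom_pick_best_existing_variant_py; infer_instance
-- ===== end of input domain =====

-- B replaces A's single reverse sort by a composite score tuple with successive per-criterion
-- filtering passes over the candidate list (objective: alternative; same asymptotic cost).

-- ===== PORT A =====
-- Shared low-level string primitives that Python has built in and PySem lacks, used by both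
-- ports (exact on the printable-ASCII domain Dom_; on ASCII, str.islower()/str.isupper() mean
-- "has a cased character and no character of the opposite case"):
def pvStrIslower (s : String) : Bool :=
  s.toList.any (fun c => PySem.Chars.islower c) && s.toList.all (fun c => !PySem.Chars.isupper c)

def pvStrIsupper (s : String) : Bool :=
  s.toList.any (fun c => PySem.Chars.isupper c) && s.toList.all (fun c => !PySem.Chars.islower c)

-- int(0.7 * n) for n ≥ 0, IEEE-double-exact: 0.7 = 6305039478318694/2^53 exactly;
-- round the product to 53 significant bits (round half to even), then floor.
def pvIntFloat07 (n : Nat) : Nat :=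
  let p := 6305039478318694 * n
  if p = 0 then 0 else
    let k := Nat.log2 p + 1 - 53
    if k = 0 then p / 2 ^ 53
    else
      let q := p >>> k
      let r := p - (q <<< k)
      let half := 2 ^ (k - 1)
      let q' := if half < r ∨ (r = half ∧ q % 2 = 1) then q + 1 else q
      (q' <<< k) / 2 ^ 53

-- words = [w for w in s.replace("_", " ").replace("-", " ").split() if w]
def pvWordsOf (s : String) : List String :=
  (PySem.Str.split₀ (PySem.Str.replace (PySem.Str.replace s "_" " ") "-" " ")).filter
    (fun w => !(w == ""))

-- A's score(v): the 8-component tuple, as a List Int (compared lexicographically = Python tuple order)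
def pvScore (v : String) : List Int :=
  let s := PySem.Str.strip v
  let has_space := PySem.Str.isIn " " s
  let has_underscore := PySem.Str.isIn "_" s
  let has_dash := PySem.Str.isIn "-" s
  let is_all_lower := pvStrIslower s
  let is_all_upper := pvStrIsupper s
  let words := pvWordsOf s
  let titleish :=
    (words.filter (fun w => pvStrIsupper (PySem.Str.slice w none (some 1)))).length ≥
      max 1 (pvIntFloat07 words.length)
  let short_token_penalty := (words.filter (fun w => PySem.Str.len w ≤ 3)).length
  [ if has_space then 1 else 0,
    if titleish then 1 else 0,
    if has_underscore then -1 else 0,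
    if has_dash then -1 else 0,
    if is_all_lower then 0 else 1,
    if is_all_upper then 0 else 1,
    -(short_token_penalty : Int),
    PySem.Str.len s ]

def pick_best_existing_variant_py (variants : List String) : String :=
  if variants = [] then "" else (PySem.List.sorted variants pvScore true).headD ""

-- ===== PORT B =====
-- criterion(i, v) of Source B
def pvCrit (i : Nat) (v : String) : Int :=
  let s := PySem.Str.strip v
  let words := pvWordsOf s
  match i with
  | 0 => if PySem.Str.isIn " " s then 1 else 0
  | 1 =>
      if (words.filter (fun w => pvStrIsupper (PySem.Str.slice w none (some 1)))).length ≥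
          max 1 (pvIntFloat07 words.length) then 1 else 0
  | 2 => if PySem.Str.isIn "_" s then -1 else 0
  | 3 => if PySem.Str.isIn "-" s then -1 else 0
  | 4 => if pvStrIslower s then 0 else 1
  | 5 => if pvStrIsupper s then 0 else 1
  | 6 => -(((words.filter (fun w => PySem.Str.len w ≤ 3)).length : Int))
  | _ => PySem.Str.len s

-- one filtering pass: keep exactly the candidates achieving best = max(criterion over cands)
def pvPass (g : String → Int) (cs : List String) : List String :=
  match cs with
  | [] => []
  | c :: rest =>
      let best := (rest.map g).foldl max (g c)
      (c :: rest).filter (fun v => g v == best)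

def pick_best_existing_variant_py_alt (variants : List String) : String :=
  if variants = [] then "" else
    ((List.range 8).foldl (fun cs i => pvPass (pvCrit i) cs) variants).headD ""

-- ===== PRECONDITION & SPEC =====
def Spec_pick_best_existing_variant_py (variants : List String) (out : String) : Prop := out = pick_best_existing_variant_py_alt variants
instance (variants : List String) (out : String) : Decidable (Spec_pick_best_existing_variant_py variants out) := by unfold Spec_pick_best_existing_variant_py; infer_instance

-- ===== CLAIM (what is proved, stated in full; the proofs are below) =====
def Claim_equal_pick_best_existing_variant_py : Prop := ∀ (variants : List String), Dom_pick_best_existing_variant_py variants → Spec_pick_best_existing_variant_py variants (pick_best_existing_variant_py variants)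

-- ===== LEMMAS AND PROOFS =====

-- generic running-max facts over a linear order
theorem pv_le_foldl_max {κ : Type} [LinearOrder κ] (l : List κ) (a : κ) :
    a ≤ l.foldl max a := by
  induction l generalizing a with
  | nil => exact le_rfl
  | cons y l ih => exact le_trans (le_max_left a y) (ih (max a y))

theorem pv_mem_le_foldl_max {κ : Type} [LinearOrder κ] (l : List κ) (a : κ) :
    ∀ y ∈ l, y ≤ l.foldl max a := by
  induction l generalizing a with
  | nil => intro y h; cases h
  | cons z l ih =>
    intro y h
    rcases List.mem_cons.mp h with rfl | h
    · exact le_trans (le_max_right a y) (pv_le_foldl_max l (max a y))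
    · exact ih (max a z) y h

theorem pv_foldl_max_mem {κ : Type} [LinearOrder κ] (l : List κ) (a : κ) :
    l.foldl max a = a ∨ l.foldl max a ∈ l := by
  induction l generalizing a with
  | nil => exact Or.inl rfl
  | cons y l ih =>
    rcases ih (max a y) with h | h
    · rcases max_choice a y with h2 | h2
      · exact Or.inl (by simp only [List.foldl_cons]; rw [h, h2])
      · refine Or.inr ?_
        simp only [List.foldl_cons]
        rw [h, h2]
        exact List.mem_cons_self
    · exact Or.inr (List.mem_cons_of_mem _ (by simpa using h))

theorem pv_foldl_max_eq {κ : Type} [LinearOrder κ] (l : List κ) (a M : κ)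
    (hatt : M = a ∨ M ∈ l) (ha : a ≤ M) (hub : ∀ y ∈ l, y ≤ M) :
    l.foldl max a = M := by
  apply le_antisymm
  · rcases pv_foldl_max_mem l a with h | h
    · rw [h]; exact ha
    · exact hub _ h
  · rcases hatt with heq | h
    · rw [heq]; exact pv_le_foldl_max l a
    · exact pv_mem_le_foldl_max l a M h

-- head of PySem's stable reverse insertion sort = the running argmax over the input order
theorem pv_insertBy_head (before : String → String → Bool) (x c : String) (rest : List String) :
    ∃ tl, PySem.List.insertBy before x (c :: rest) =
      (if before x c then x else c) :: tl := by
  by_cases h : before x c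
  · exact ⟨c :: rest, by simp [PySem.List.insertBy, h]⟩
  · exact ⟨PySem.List.insertBy before x rest, by simp [PySem.List.insertBy, h]⟩

theorem pv_foldl_ins_head (f : String → List Int) (t : List String) :
    ∀ (acc : List String) (c : String) (rest : List String), acc = c :: rest →
      (t.foldl (fun a y => PySem.List.insertBy (fun a b => decide (f b < f a)) y a) acc).headD ""
        = t.foldl (fun b y => if f b < f y then y else b) c := by
  induction t with
  | nil => intro acc c rest h; simp [h]
  | cons y t ih =>
    intro acc c rest h
    subst h
    obtain ⟨tl, htl⟩ := pv_insertBy_head (fun a b => decide (f b < f a)) y c rest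
    simp only [List.foldl_cons]
    rw [ih _ _ _ htl]
    by_cases hlt : f c < f y <;> simp [hlt]

theorem pv_sorted_rev_head (f : String → List Int) (x : String) (t : List String) :
    (PySem.List.sorted (x :: t) f true).headD ""
      = t.foldl (fun b y => if f b < f y then y else b) x := by
  rw [PySem.List.sorted_rev_eq_foldl_insertBy]
  simp only [List.foldl_cons]
  exact pv_foldl_ins_head f t _ x [] (by simp [PySem.List.insertBy])

-- the running argmax is the FIRST element attaining the maximal key
theorem pv_argmax_eq_find (f : String → List Int) (x : String) (t : List String) :
    some (t.foldl (fun b y => if f b < f y then y else b) x)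
      = (x :: t).find? (fun y => f y == (t.map f).foldl max (f x)) := by
  induction t generalizing x with
  | nil => simp
  | cons y t ih =>
    have hM : ((y :: t).map f).foldl max (f x)
        = (t.map f).foldl max (f (if f x < f y then y else x)) := by
      by_cases h : f x < f y
      · simp only [List.map_cons, List.foldl_cons, if_pos h]
        rw [max_eq_right (le_of_lt h)]
      · simp only [List.map_cons, List.foldl_cons, if_neg h]
        rw [max_eq_left (le_of_not_gt h)]
    have hfxM : f x ≤ ((y :: t).map f).foldl max (f x) := by
      simp only [List.map_cons, List.foldl_cons]
      exact le_trans (le_max_left _ _) (pv_le_foldl_max _ _)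
    have hkey : (x :: y :: t).find? (fun z => f z == ((y :: t).map f).foldl max (f x))
        = ((if f x < f y then y else x) :: t).find?
            (fun z => f z == ((y :: t).map f).foldl max (f x)) := by
      by_cases h : f x < f y
      · have hxlt : f x < ((y :: t).map f).foldl max (f x) := by
          simp only [List.map_cons, List.foldl_cons]
          exact lt_of_lt_of_le (lt_of_lt_of_le h (le_max_right _ _)) (pv_le_foldl_max _ _)
        rw [List.find?_cons_of_neg (by simp only [beq_iff_eq]; exact ne_of_lt hxlt)]
        simp [h]
      · simp only [if_neg h]
        by_cases hx : f x = ((y :: t).map f).foldl max (f x)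
        · rw [List.find?_cons_of_pos (by simp only [beq_iff_eq]; exact hx),
            List.find?_cons_of_pos (by simp only [beq_iff_eq]; exact hx)]
        · have hxlt : f x < ((y :: t).map f).foldl max (f x) := lt_of_le_of_ne hfxM hx
          have hy : f y < ((y :: t).map f).foldl max (f x) :=
            lt_of_le_of_lt (le_of_not_gt h) hxlt
          rw [List.find?_cons_of_neg (by simp only [beq_iff_eq]; exact hx),
            List.find?_cons_of_neg (by simp only [beq_iff_eq]; exact ne_of_lt hy),
            List.find?_cons_of_neg (by simp only [beq_iff_eq]; exact hx)]
    calc some ((y :: t).foldl (fun b z => if f b < f z then z else b) x)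
        = some (t.foldl (fun b z => if f b < f z then z else b) (if f x < f y then y else x)) := by
          simp only [List.foldl_cons]
      _ = ((if f x < f y then y else x) :: t).find?
            (fun z => f z == (t.map f).foldl max (f (if f x < f y then y else x))) := ih _
      _ = ((if f x < f y then y else x) :: t).find?
            (fun z => f z == ((y :: t).map f).foldl max (f x)) := by rw [hM]
      _ = (x :: y :: t).find? (fun z => f z == ((y :: t).map f).foldl max (f x)) := hkey.symm

-- composite key of a list of criteria
def pvKey (gs : List (String → Int)) (v : String) : List Int := gs.map (fun g => g v)

-- one filtering pass preserves the "first lexicographic argmax", shifting the key one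
-- component to the right: the survivors are exactly the maximizers of the head criterion.
theorem pv_pass_find (g : String → Int) (r : String → List Int) (x : String) (t : List String) :
    ∃ x' t', pvPass g (x :: t) = x' :: t' ∧
      (x :: t).find? (fun y => (g y :: r y) ==
          (t.map (fun y => g y :: r y)).foldl max (g x :: r x))
        = (x' :: t').find? (fun y => r y == (t'.map r).foldl max (r x')) := by
  have hp : pvPass g (x :: t)
      = (x :: t).filter (fun v => g v == (t.map g).foldl max (g x)) := rfl
  -- the maximum of g over x :: t is attained, so the filtered list is nonempty
  have hw : ∃ w ∈ x :: t, g w = (t.map g).foldl max (g x) := by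
    rcases pv_foldl_max_mem (t.map g) (g x) with h | h
    · exact ⟨x, List.mem_cons_self, h.symm⟩
    · obtain ⟨w, hw, hgw⟩ := List.mem_map.mp h
      exact ⟨w, List.mem_cons_of_mem _ hw, hgw⟩
  obtain ⟨w, hwmem, hgw⟩ := hw
  have hwf : w ∈ (x :: t).filter (fun v => g v == (t.map g).foldl max (g x)) :=
    List.mem_filter.mpr ⟨hwmem, by simp [hgw]⟩
  cases hl : (x :: t).filter (fun v => g v == (t.map g).foldl max (g x)) with
  | nil => rw [hl] at hwf; cases hwf
  | cons x' t' =>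
    refine ⟨x', t', by rw [hp, hl], ?_⟩
    -- facts about the survivors
    have hsurv : ∀ e ∈ x' :: t', g e = (t.map g).foldl max (g x) ∧ e ∈ x :: t := by
      intro e he
      rw [← hl] at he
      have := List.mem_filter.mp he
      exact ⟨by simpa using this.2, this.1⟩
    have hrb : ∀ e ∈ x' :: t', r e ≤ (t'.map r).foldl max (r x') := by
      intro e he
      rcases List.mem_cons.mp he with rfl | he
      · exact pv_le_foldl_max _ _
      · exact pv_mem_le_foldl_max _ _ _ (List.mem_map.mpr ⟨e, he, rfl⟩)
    have hmemf : ∀ e ∈ x :: t, g e = (t.map g).foldl max (g x) → e ∈ x' :: t' := by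
      intro e he hge
      rw [← hl]
      exact List.mem_filter.mpr ⟨he, by simp [hge]⟩
    -- upper bound for the composite key
    have hub : ∀ y ∈ x :: t, (g y :: r y) ≤
        (t.map g).foldl max (g x) :: (t'.map r).foldl max (r x') := by
      intro y hy
      have hg : g y ≤ (t.map g).foldl max (g x) := by
        rcases List.mem_cons.mp hy with rfl | hy2
        · exact pv_le_foldl_max _ _
        · exact pv_mem_le_foldl_max _ _ _ (List.mem_map.mpr ⟨y, hy2, rfl⟩)
      rcases lt_or_eq_of_le hg with hlt | heq
      · exact le_of_lt (List.Lex.rel hlt)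
      · rw [heq]
        exact List.cons_le_cons _ (hrb y (hmemf y hy heq))
    -- the composite maximum decomposes as (max of g) :: (max of r over the survivors)
    have hM2 : (t.map (fun y => g y :: r y)).foldl max (g x :: r x)
        = (t.map g).foldl max (g x) :: (t'.map r).foldl max (r x') := by
      apply pv_foldl_max_eq
      · -- attained
        have hw' : ∃ w' ∈ x' :: t', r w' = (t'.map r).foldl max (r x') := by
          rcases pv_foldl_max_mem (t'.map r) (r x') with h | h
          · exact ⟨x', List.mem_cons_self, h.symm⟩
          · obtain ⟨w', hw', hrw'⟩ := List.mem_map.mp h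
            exact ⟨w', List.mem_cons_of_mem _ hw', hrw'⟩
        obtain ⟨w', hw'mem, hrw'⟩ := hw'
        obtain ⟨hgw', hw'orig⟩ := hsurv w' hw'mem
        rcases List.mem_cons.mp hw'orig with rfl | hw2
        · exact Or.inl (by rw [← hgw', ← hrw'])
        · exact Or.inr (List.mem_map.mpr ⟨w', hw2, by rw [hgw', hrw']⟩)
      · exact hub x List.mem_cons_self
      · intro yk hyk
        obtain ⟨y, hy, rfl⟩ := List.mem_map.mp hyk
        exact hub y (List.mem_cons_of_mem _ hy)
    rw [hM2]
    -- find? through the filter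
    have hpred : (fun y => (g y :: r y) ==
        (t.map g).foldl max (g x) :: (t'.map r).foldl max (r x'))
        = fun y => (g y == (t.map g).foldl max (g x)) &&
            (r y == (t'.map r).foldl max (r x')) := by
      funext y; rfl
    rw [hpred, ← hl, List.find?_filter]
    congr 1
    funext y
    by_cases h1 : g y == (t.map g).foldl max (g x) <;>
      by_cases h2 : r y == (t'.map r).foldl max (r x') <;> simp [h1, h2]

theorem pv_cascade_head (gs : List (String → Int)) :
    ∀ (x : String) (t : List String),
      ((gs.foldl (fun cs g => pvPass g cs) (x :: t)).headD "")
        = t.foldl (fun b y => if pvKey gs b < pvKey gs y then y else b) x := by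
  induction gs with
  | nil =>
    intro x t
    simp only [List.foldl_nil, List.headD_cons]
    induction t generalizing x with
    | nil => rfl
    | cons y t ih =>
      have hn : ¬ pvKey [] x < pvKey [] y := lt_irrefl ([] : List Int)
      rw [List.foldl_cons, if_neg hn]
      exact ih x
  | cons g gs ih =>
    intro x t
    obtain ⟨x', t', hpass, hfind⟩ := pv_pass_find g (pvKey gs) x t
    have h1 := pv_argmax_eq_find (pvKey (g :: gs)) x t
    have h2 := pv_argmax_eq_find (pvKey gs) x' t'
    have hchain : some (t'.foldl (fun b y => if pvKey gs b < pvKey gs y then y else b) x')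
        = some (t.foldl (fun b y => if pvKey (g :: gs) b < pvKey (g :: gs) y then y else b) x) := by
      rw [h2, h1]
      exact (hfind.trans rfl).symm
    simp only [List.foldl_cons]
    rw [hpass, ih x' t', Option.some_inj.mp hchain]

theorem pv_score_eq_key (v : String) :
    pvScore v = pvKey ((List.range 8).map pvCrit) v := rfl

-- ===== VERDICT (by name: the statement is the Claim_ definition above) =====
theorem pick_best_existing_variant_py_spec : Claim_equal_pick_best_existing_variant_py := by
  intro variants _
  unfold Spec_pick_best_existing_variant_py
  unfold pick_best_existing_variant_py pick_best_existing_variant_py_alt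
  cases variants with
  | nil => rfl
  | cons x t =>
    simp only [if_neg (List.cons_ne_nil x t)]
    rw [pv_sorted_rev_head]
    have hc := pv_cascade_head ((List.range 8).map pvCrit) x t
    simp only [List.foldl_map] at hc
    rw [hc]
    simp only [← pv_score_eq_key]
    rfl
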